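-- pv_equiv track=rewrite | github.com/alexandershov/IdeaProjects | leetcode/maximum_length_of_subarray_with_positive_product.py | iter_maxes_at_indexes
-- ===== SOURCE A (Python) =====
-- def iter_maxes_at_indexes(nums):
--     prev_max_positive = 0
--     prev_max_negative = 0
--     for a_num in nums:
--         if a_num > 0:
--             max_positive = prev_max_positive + 1
--             max_negative = prev_max_negative + 1 if prev_max_negative else 0
--
--         elif a_num < 0:
--             max_positive = prev_max_negative + 1 if prev_max_negative else 0
--             max_negative = prev_max_positive + 1
--         else:
--             max_positive = 0
--             max_negative = 0
--         yield max_positive, max_negative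
--         prev_max_positive, prev_max_negative = max_positive, max_negative
-- ===== SOURCE B (Python) =====
-- def iter_maxes_at_indexes(nums):
--     # Positional one-pass: track the index of the last reset (zero), the index
--     # of the first negative since that reset, and the parity of negatives seen;
--     # each yield is computed from index arithmetic instead of DP on two lengths.
--     last_reset = -1
--     first_negative = None
--     neg_parity = 0
--     for i, a in enumerate(nums):
--         if a > 0:
--             pass
--         elif a < 0:
--             neg_parity ^= 1
--             if first_negative is None:
--                 first_negative = i
--         else:
--             last_reset = i
--             first_negative = None
--             neg_parity = 0
--             yield 0, 0
--             continue
--         since_first_neg = i - first_negative if first_negative is not None else 0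
--         if neg_parity == 0:
--             yield i - last_reset, since_first_neg
--         else:
--             yield since_first_neg, i - last_reset
-- ===== Notes on version B (the rewrite author's own statement) =====
-- stated objective: alternative
-- what changed: Replaces A's two-length DP recurrence (prev positive/negative lengths updated and swapped each step) with index arithmetic over three scalars: the last reset index, the first-negative index since that reset, and the negative-count parity; each yielded pair is computed as differences of indices.
import Mathlib
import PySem

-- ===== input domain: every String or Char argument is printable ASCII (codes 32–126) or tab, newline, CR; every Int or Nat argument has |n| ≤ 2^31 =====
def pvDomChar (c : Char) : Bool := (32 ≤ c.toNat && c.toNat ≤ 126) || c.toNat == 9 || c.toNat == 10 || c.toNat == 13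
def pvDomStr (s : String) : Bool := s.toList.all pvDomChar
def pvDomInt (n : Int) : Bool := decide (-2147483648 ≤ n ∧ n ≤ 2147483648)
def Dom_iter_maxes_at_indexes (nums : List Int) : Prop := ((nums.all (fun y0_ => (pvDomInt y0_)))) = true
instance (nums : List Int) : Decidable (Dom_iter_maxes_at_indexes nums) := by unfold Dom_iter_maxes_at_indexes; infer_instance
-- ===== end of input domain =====

-- B replaces A's two-length DP with index arithmetic from three scalars
-- (last reset index, first-negative index, negative parity); objective: alternative.

-- ===== PORT A =====
-- A's generator loop: state (prev_max_positive, prev_max_negative), yielding each pair.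
def iterA_go (nums : List Int) (pp pn : Int) : List (Int × Int) :=
  match nums with
  | [] => []
  | a :: rest =>
    let s : Int × Int :=
      if a > 0 then (pp + 1, if pn ≠ 0 then pn + 1 else 0)
      else if a < 0 then ((if pn ≠ 0 then pn + 1 else 0), pp + 1)
      else (0, 0)
    s :: iterA_go rest s.1 s.2

def iter_maxes_at_indexes (nums : List Int) : List (Int × Int) :=
  iterA_go nums 0 0

-- ===== PORT B =====
-- B's loop: index i, last reset index r, first negative index fn, negative parity par.
def iterB_go (nums : List Int) (i : Int) (r : Int) (fn : Option Int) (par : Bool) :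
    List (Int × Int) :=
  match nums with
  | [] => []
  | a :: rest =>
    if a > 0 then
      let sn : Int := match fn with | some f => i - f | none => 0
      (if par then (sn, i - r) else (i - r, sn)) :: iterB_go rest (i + 1) r fn par
    else if a < 0 then
      let par' := !par
      let fn' : Option Int := match fn with | some f => some f | none => some i
      let sn : Int := match fn' with | some f => i - f | none => 0
      (if par' then (sn, i - r) else (i - r, sn)) :: iterB_go rest (i + 1) r fn' par'
    else
      (0, 0) :: iterB_go rest (i + 1) i none false

def iter_maxes_at_indexes_alt (nums : List Int) : List (Int × Int) :=
  iterB_go nums 0 (-1) none false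

-- ===== PRECONDITION & SPEC =====
def Spec_iter_maxes_at_indexes (nums : List Int) (out : List (Int × Int)) : Prop := out = iter_maxes_at_indexes_alt nums
instance (nums : List Int) (out : List (Int × Int)) : Decidable (Spec_iter_maxes_at_indexes nums out) := by unfold Spec_iter_maxes_at_indexes; infer_instance

-- ===== CLAIM (what is proved, stated in full; the proofs are below) =====
def Claim_equal_iter_maxes_at_indexes : Prop := ∀ (nums : List Int), Dom_iter_maxes_at_indexes nums → Spec_iter_maxes_at_indexes nums (iter_maxes_at_indexes nums)

-- ===== LEMMAS AND PROOFS =====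

-- Invariant linking A's DP state (pp, pn) to B's positional state (i, r, fn, par).
def pvInv (i r : Int) (fn : Option Int) (par : Bool) (pp pn : Int) : Prop :=
  r ≤ i - 1 ∧
  ((par = false ∧ fn = none ∧ pp = i - 1 - r ∧ pn = 0) ∨
   (∃ f, par = false ∧ fn = some f ∧ pp = i - 1 - r ∧ pn = i - 1 - f ∧ f ≤ i - 2) ∨
   (∃ f, par = true ∧ fn = some f ∧ pp = i - 1 - f ∧ pn = i - 1 - r ∧ f ≤ i - 1 ∧ r ≤ i - 2))

theorem iterA_go_eq_iterB_go (nums : List Int) :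
    ∀ (i r : Int) (fn : Option Int) (par : Bool) (pp pn : Int),
      pvInv i r fn par pp pn → iterA_go nums pp pn = iterB_go nums i r fn par := by
  induction nums with
  | nil => intro _ _ _ _ _ _ _; rfl
  | cons a rest ih =>
    intro i r fn par pp pn hinv
    obtain ⟨hr, hcase⟩ := hinv
    by_cases hpos : a > 0
    · have hneg : ¬ a < 0 := by omega
      rcases hcase with ⟨hp, hf, h1, h2⟩ | ⟨f, hp, hf, h1, h2, h3⟩ | ⟨f, hp, hf, h1, h2, h3, h4⟩ <;>
        subst hp <;> subst hf <;>
        simp only [iterA_go, iterB_go, if_pos hpos, Bool.false_eq_true, if_false, if_true]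
      · have e2 : (if pn ≠ 0 then pn + 1 else 0) = (0 : Int) := by simp [h2]
        rw [e2]
        have e1 : pp + 1 = i - r := by omega
        rw [e1]
        exact congrArg _ (ih (i + 1) r none false (i - r) 0
          ⟨by omega, Or.inl ⟨rfl, rfl, by omega, rfl⟩⟩)
      · have e2 : (if pn ≠ 0 then pn + 1 else 0) = i - f := by
          rw [if_pos (by omega)]; omega
        rw [e2]
        have e1 : pp + 1 = i - r := by omega
        rw [e1]
        exact congrArg _ (ih (i + 1) r (some f) false (i - r) (i - f)
          ⟨by omega, Or.inr (Or.inl ⟨f, rfl, rfl, by omega, by omega, by omega⟩)⟩)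
      · have e2 : (if pn ≠ 0 then pn + 1 else 0) = i - r := by
          rw [if_pos (by omega)]; omega
        rw [e2]
        have e1 : pp + 1 = i - f := by omega
        rw [e1]
        exact congrArg _ (ih (i + 1) r (some f) true (i - f) (i - r)
          ⟨by omega, Or.inr (Or.inr ⟨f, rfl, rfl, by omega, by omega, by omega, by omega⟩)⟩)
    · by_cases hneg : a < 0
      · rcases hcase with ⟨hp, hf, h1, h2⟩ | ⟨f, hp, hf, h1, h2, h3⟩ | ⟨f, hp, hf, h1, h2, h3, h4⟩ <;>
          subst hp <;> subst hf <;>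
          simp only [iterA_go, iterB_go, if_neg hpos, if_pos hneg, Bool.not_false,
            Bool.not_true, Bool.false_eq_true, if_false, if_true]
        · have e2 : (if pn ≠ 0 then pn + 1 else 0) = (0 : Int) := by simp [h2]
          rw [e2]
          have e0 : i - i = (0 : Int) := by omega
          have e1 : pp + 1 = i - r := by omega
          rw [e1, e0]
          exact congrArg _ (ih (i + 1) r (some i) true 0 (i - r)
            ⟨by omega, Or.inr (Or.inr ⟨i, rfl, rfl, by omega, by omega, by omega, by omega⟩)⟩)
        · have e2 : (if pn ≠ 0 then pn + 1 else 0) = i - f := by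
            rw [if_pos (by omega)]; omega
          rw [e2]
          have e1 : pp + 1 = i - r := by omega
          rw [e1]
          exact congrArg _ (ih (i + 1) r (some f) true (i - f) (i - r)
            ⟨by omega, Or.inr (Or.inr ⟨f, rfl, rfl, by omega, by omega, by omega, by omega⟩)⟩)
        · have e2 : (if pn ≠ 0 then pn + 1 else 0) = i - r := by
            rw [if_pos (by omega)]; omega
          rw [e2]
          have e1 : pp + 1 = i - f := by omega
          rw [e1]
          exact congrArg _ (ih (i + 1) r (some f) false (i - r) (i - f)
            ⟨by omega, Or.inr (Or.inl ⟨f, rfl, rfl, by omega, by omega, by omega⟩)⟩)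
      · simp only [iterA_go, iterB_go, if_neg hpos, if_neg hneg]
        exact congrArg _ (ih (i + 1) i none false 0 0
          ⟨by omega, Or.inl ⟨rfl, rfl, by omega, rfl⟩⟩)

-- ===== VERDICT (by name: the statement is the Claim_ definition above) =====
theorem iter_maxes_at_indexes_spec : Claim_equal_iter_maxes_at_indexes := by
  intro nums _
  unfold Spec_iter_maxes_at_indexes iter_maxes_at_indexes iter_maxes_at_indexes_alt
  exact iterA_go_eq_iterB_go nums 0 (-1) none false 0 0
    ⟨by omega, Or.inl ⟨rfl, rfl, by omega, rfl⟩⟩
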